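-- pv_equiv track=rewrite | github.com/ChouseinChouseinko/PythonProjects | StringScramble.py | StringScramble
-- ===== SOURCE A (Python) =====
-- def StringScramble(str1, str2):
--     from collections import Counter
--     varfilters = Counter(str1)
--     varocg = Counter(str2)
--
--     for char in varocg:
--         if varocg[char] > varfilters.get(char, 0):
--             return "false"
--
--     return "true"
--
--     # code goes here
--     return str1
-- ===== SOURCE B (Python) =====
-- def StringScramble(str1, str2):
--     s1 = sorted(str1)
--     s2 = sorted(str2)
--     i = 0
--     for c in s2:
--         while i < len(s1) and s1[i] < c:
--             i += 1
--         if i == len(s1) or s1[i] != c: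
--             return "false"
--         i += 1
--     return "true"
-- ===== Notes on version B (the rewrite author's own statement) =====
-- stated objective: alternative
-- what changed: B uses no counters at all: it sorts both strings and runs a two-pointer merge scan checking that the sorted str2 embeds into the sorted str1, failing the moment a needed character is absent.
import Mathlib
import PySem

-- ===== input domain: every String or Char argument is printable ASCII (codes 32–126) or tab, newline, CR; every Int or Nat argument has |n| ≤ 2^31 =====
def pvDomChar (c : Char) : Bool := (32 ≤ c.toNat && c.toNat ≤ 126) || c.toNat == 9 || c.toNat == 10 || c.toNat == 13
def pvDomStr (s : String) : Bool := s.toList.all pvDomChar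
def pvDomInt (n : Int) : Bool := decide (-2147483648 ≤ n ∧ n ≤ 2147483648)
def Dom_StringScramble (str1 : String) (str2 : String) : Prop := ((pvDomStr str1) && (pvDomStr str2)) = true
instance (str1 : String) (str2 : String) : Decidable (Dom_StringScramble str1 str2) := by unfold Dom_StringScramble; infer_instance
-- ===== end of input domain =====

-- B replaces A's two-Counter comparison by sorting both strings and a two-pointer merge scan (sorted str2 must embed into sorted str1); objective: alternative, no counters anywhere.


-- ===== PORT A =====
-- A's 'for char in varocg: if varocg[char] > varfilters.get(char, 0): return "false"' loop
def pvALoop (varfilters varocg : PySem.Dict Char Int) : List Char → String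
  | [] => "true"
  | c :: rest =>
    if varocg.getD c 0 > varfilters.getD c 0 then "false" else pvALoop varfilters varocg rest

def StringScramble (str1 : String) (str2 : String) : String :=
  let varfilters := PySem.Dict.counter str1.toList
  let varocg := PySem.Dict.counter str2.toList
  pvALoop varfilters varocg varocg.keys

-- ===== PORT B =====
-- B's two-pointer merge scan over sorted(str1)/sorted(str2): the index i into s1 is the
-- remaining suffix of s1; the inner 'while s1[i] < c: i += 1' is the (x < c) branch.
def pvBScan (s1 : List Char) (s2 : List Char) : String :=
  match s1, s2 with
  | _, [] => "true"
  | [], _ :: _ => "false"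
  | x :: xs, c :: rest =>
    if x < c then pvBScan xs (c :: rest)
    else if x = c then pvBScan xs rest
    else "false"
termination_by s1.length + s2.length

def StringScramble_alt (str1 : String) (str2 : String) : String :=
  pvBScan (PySem.List.sorted str1.toList (fun x => x) false)
          (PySem.List.sorted str2.toList (fun x => x) false)

-- ===== PRECONDITION & SPEC =====
def Spec_StringScramble (str1 : String) (str2 : String) (out : String) : Prop := out = StringScramble_alt str1 str2
instance (str1 : String) (str2 : String) (out : String) : Decidable (Spec_StringScramble str1 str2 out) := by unfold Spec_StringScramble; infer_instance

-- ===== CLAIM =====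
def Claim_equal_StringScramble : Prop := ∀ (str1 : String) (str2 : String), Dom_StringScramble str1 str2 → Spec_StringScramble str1 str2 (StringScramble str1 str2)

-- ===== LEMMAS AND PROOFS =====

theorem pvALoop_eq (f o : PySem.Dict Char Int) (ks : List Char) :
    pvALoop f o ks = if ∀ c ∈ ks, o.getD c 0 ≤ f.getD c 0 then "true" else "false" := by
  induction ks with
  | nil => simp [pvALoop]
  | cons c rest ih =>
    by_cases h : o.getD c 0 > f.getD c 0
    · rw [pvALoop, if_pos h, if_neg]
      intro hall
      exact absurd (hall c (List.mem_cons_self)) (not_le.mpr h)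
    · rw [pvALoop, if_neg h, ih]
      refine if_congr ?_ rfl rfl
      rw [List.forall_mem_cons]
      exact (and_iff_right (not_lt.mp h)).symm

theorem pvBScan_eq (s1 s2 : List Char)
    (h1 : s1.Pairwise (· ≤ ·)) (h2 : s2.Pairwise (· ≤ ·)) :
    pvBScan s1 s2 = if ∀ c ∈ s2, s2.count c ≤ s1.count c then "true" else "false" := by
  induction s1, s2 using pvBScan.induct with
  | case1 s1 => simp [pvBScan]
  | case2 c rest =>
    rw [pvBScan, if_neg]
    intro hall
    have := hall c List.mem_cons_self
    simp [List.count_cons_self] at this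
  | case3 x xs c rest hlt ih =>
    rw [pvBScan, if_pos hlt, ih (List.Pairwise.of_cons h1) h2]
    refine if_congr ?_ rfl rfl
    have hxlt : ∀ c' ∈ c :: rest, x < c' := by
      intro c' hc'
      rcases List.mem_cons.mp hc' with rfl | hr
      · exact hlt
      · exact lt_of_lt_of_le hlt (List.rel_of_pairwise_cons h2 hr)
    have hcount : ∀ c' ∈ c :: rest, (x :: xs).count c' = xs.count c' := by
      intro c' hc'
      rw [List.count_cons, if_neg (by simpa using ne_of_lt (hxlt c' hc')), Nat.add_zero]
    constructor
    · intro hall c' hc'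
      rw [hcount c' hc']
      exact hall c' hc'
    · intro hall c' hc'
      rw [← hcount c' hc']
      exact hall c' hc'
  | case4 xs x rest hlt ih =>
    rw [pvBScan, if_neg hlt, if_pos rfl,
      ih (List.Pairwise.of_cons h1) (List.Pairwise.of_cons h2)]
    refine if_congr ?_ rfl rfl
    constructor
    · intro hall c' hc'
      by_cases hc : c' = x
      · subst hc
        rw [List.count_cons_self, List.count_cons_self]
        by_cases hr : c' ∈ rest
        · have := hall c' hr
          omega
        · rw [List.count_eq_zero.mpr hr]
          omega
      · have hr : c' ∈ rest := (List.mem_cons.mp hc').resolve_left hc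
        have := hall c' hr
        rw [List.count_cons, if_neg (by simpa using Ne.symm hc),
          List.count_cons, if_neg (by simpa using Ne.symm hc)]
        simpa using this
    · intro hall c' hc'
      by_cases hc : c' = x
      · subst hc
        have := hall c' List.mem_cons_self
        rw [List.count_cons_self, List.count_cons_self] at this
        omega
      · have := hall c' (List.mem_cons_of_mem _ hc')
        rw [List.count_cons, if_neg (by simpa using Ne.symm hc),
          List.count_cons, if_neg (by simpa using Ne.symm hc)] at this
        simpa using this
  | case5 x xs c rest hlt hne =>
    rw [pvBScan, if_neg hlt, if_neg hne, if_neg]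
    intro hall
    have hclt : c < x := lt_of_le_of_ne (not_lt.mp hlt) (Ne.symm hne)
    have hnotmem : c ∉ x :: xs := by
      intro hmem
      rcases List.mem_cons.mp hmem with rfl | hr
      · exact hne rfl
      · exact absurd (lt_of_lt_of_le hclt (List.rel_of_pairwise_cons h1 hr)) (lt_irrefl c)
    have := hall c List.mem_cons_self
    rw [List.count_cons_self, List.count_eq_zero.mpr hnotmem] at this
    omega

-- ===== VERDICT =====
theorem StringScramble_spec : Claim_equal_StringScramble := by
  intro str1 str2 _
  show StringScramble str1 str2 = StringScramble_alt str1 str2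
  have hA : StringScramble str1 str2 =
      pvALoop (PySem.Dict.counter str1.toList) (PySem.Dict.counter str2.toList)
        (PySem.Dict.counter str2.toList).keys := rfl
  rw [hA, pvALoop_eq, PySem.Dict.keys_counter,
    show StringScramble_alt str1 str2 =
      pvBScan (PySem.List.sorted str1.toList (fun x => x) false)
        (PySem.List.sorted str2.toList (fun x => x) false) from rfl,
    pvBScan_eq _ _ (by simpa using PySem.List.sorted_pairwise str1.toList (fun x => x))
      (by simpa using PySem.List.sorted_pairwise str2.toList (fun x => x))]
  have hc1 : ∀ c, (PySem.List.sorted str1.toList (fun x => x) false).count c = str1.toList.count c :=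
    fun c => (PySem.List.sorted_perm str1.toList (fun x => x) false).count_eq c
  have hc2 : ∀ c, (PySem.List.sorted str2.toList (fun x => x) false).count c = str2.toList.count c :=
    fun c => (PySem.List.sorted_perm str2.toList (fun x => x) false).count_eq c
  refine if_congr ?_ rfl rfl
  constructor
  · intro hall c hc
    rw [hc1, hc2]
    have hm : c ∈ str2.toList :=
      (PySem.List.mem_sorted _ _ _ _).mp hc
    have := hall c ((PySem.Set.mem_ofList _ _).mpr hm)
    rw [PySem.Dict.getD_counter, PySem.Dict.getD_counter] at this
    exact_mod_cast this
  · intro hall c hc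
    rw [PySem.Dict.getD_counter, PySem.Dict.getD_counter]
    have hm : c ∈ PySem.List.sorted str2.toList (fun x => x) false :=
      (PySem.List.mem_sorted _ _ _ _).mpr ((PySem.Set.mem_ofList _ _).mp hc)
    have := hall c hm
    rw [hc1, hc2] at this
    exact_mod_cast this
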